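-- pv_equiv track=rewrite | github.com/irit-melodi/irit-stac | intake/csvtoglozz.py | edu_spans
-- ===== SOURCE A (Python) =====
-- from collections import namedtuple
--
-- class Span(namedtuple('Span', 'left right')):
--     """
--     Simple l/r pair
--     """
--
-- def edu_spans(text, pieces):
--     """
--     Return a list of tuples representing the spans from one segment
--     to another
--     """
--     spans = []
--     next_seg_left = len(text)
--     for tseg in pieces:
--         tseg_l = tseg.lstrip()
--         tseg_lr = tseg_l.rstrip()
--         padding_left = len(tseg) - len(tseg_l)
--         padding_right = len(tseg_l) - len(tseg_lr)
--         tmp_seg_left = next_seg_left + padding_left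
--         tmp_seg_right = tmp_seg_left + len(tseg_lr)
--         next_seg_left = tmp_seg_right + padding_right
--         spans.append(Span(tmp_seg_left, tmp_seg_right))
--     return spans
-- ===== SOURCE B (Python) =====
-- def edu_spans(text, pieces):
--     # Two-pass form: prefix-sum offsets first (each piece advances the cursor
--     # by exactly its raw length), then map each (offset, piece) to its span.
--     offsets = [len(text)]
--     for p in pieces:
--         offsets.append(offsets[-1] + len(p))
--     spans = []
--     for off, p in zip(offsets, pieces):
--         lead = len(p) - len(p.lstrip())
--         spans.append((off + lead, off + lead + len(p.strip())))
--     return spans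
-- ===== Notes on version B (the rewrite author's own statement) =====
-- stated objective: simpler
-- what changed: Replaces A's single loop threading left/right padding state with a prefix-sum pass over raw piece lengths (the cursor advances by exactly len(piece)) followed by an independent mapping pass computing each span from lstrip/strip lengths.
import Mathlib
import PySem

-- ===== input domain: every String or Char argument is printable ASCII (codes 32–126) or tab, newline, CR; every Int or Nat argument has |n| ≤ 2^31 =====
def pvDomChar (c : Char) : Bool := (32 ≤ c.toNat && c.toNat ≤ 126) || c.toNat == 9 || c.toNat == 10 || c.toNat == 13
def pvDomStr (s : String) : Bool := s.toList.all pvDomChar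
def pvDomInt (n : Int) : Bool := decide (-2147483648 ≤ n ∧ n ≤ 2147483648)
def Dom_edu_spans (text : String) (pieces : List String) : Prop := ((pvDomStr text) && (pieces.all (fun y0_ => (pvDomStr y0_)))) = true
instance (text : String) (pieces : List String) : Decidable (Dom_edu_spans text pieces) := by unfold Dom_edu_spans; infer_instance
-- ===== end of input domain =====

-- B replaces A's padding-threading loop with a prefix-sum offsets pass plus an independent mapping pass (same cost, simpler decomposition).


-- ===== PORT A =====
def edu_spans (text : String) (pieces : List String) : List (Int × Int) :=
  (pieces.foldl (fun (st : Int × List (Int × Int)) tseg =>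
      let tseg_l := PySem.Str.lstrip tseg
      let tseg_lr := PySem.Str.rstrip tseg_l
      let padding_left : Int := (PySem.Str.len tseg : Int) - (PySem.Str.len tseg_l : Int)
      let padding_right : Int := (PySem.Str.len tseg_l : Int) - (PySem.Str.len tseg_lr : Int)
      let tmp_seg_left : Int := st.1 + padding_left
      let tmp_seg_right : Int := tmp_seg_left + (PySem.Str.len tseg_lr : Int)
      (tmp_seg_right + padding_right, st.2 ++ [(tmp_seg_left, tmp_seg_right)]))
    ((PySem.Str.len text : Int), [])).2

-- ===== PORT B =====
def edu_spans_alt (text : String) (pieces : List String) : List (Int × Int) :=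
  let offsets : List Int :=
    pieces.foldl (fun (acc : List Int) p => acc ++ [acc.getLast! + (PySem.Str.len p : Int)])
      [(PySem.Str.len text : Int)]
  (offsets.zip pieces).map (fun op =>
    let lead : Int := (PySem.Str.len op.2 : Int) - (PySem.Str.len (PySem.Str.lstrip op.2) : Int)
    (op.1 + lead, op.1 + lead + (PySem.Str.len (PySem.Str.strip op.2) : Int)))

-- ===== PRECONDITION & SPEC =====
def Spec_edu_spans (text : String) (pieces : List String) (out : List (Int × Int)) : Prop := out = edu_spans_alt text pieces
instance (text : String) (pieces : List String) (out : List (Int × Int)) : Decidable (Spec_edu_spans text pieces out) := by unfold Spec_edu_spans; infer_instance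

-- ===== CLAIM (what is proved, stated in full; the proofs are below) =====
def Claim_equal_edu_spans : Prop := ∀ (text : String) (pieces : List String), Dom_edu_spans text pieces → Spec_edu_spans text pieces (edu_spans text pieces)

-- ===== LEMMAS AND PROOFS =====

-- reference spans: left offset s, one span per piece
def pvGo (s : Int) : List String → List (Int × Int)
  | [] => []
  | p :: ps =>
      (s + ((PySem.Str.len p : Int) - (PySem.Str.len (PySem.Str.lstrip p) : Int)),
       s + ((PySem.Str.len p : Int) - (PySem.Str.len (PySem.Str.lstrip p) : Int))
         + (PySem.Str.len (PySem.Str.strip p) : Int))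
        :: pvGo (s + (PySem.Str.len p : Int)) ps

-- reference offsets: s, then s + |p| cumulatively
def pvOffs (s : Int) : List String → List Int
  | [] => [s]
  | p :: ps => s :: pvOffs (s + (PySem.Str.len p : Int)) ps

lemma strip_eq_rstrip_lstrip (s : String) :
    PySem.Str.strip s = PySem.Str.rstrip (PySem.Str.lstrip s) := by
  simp only [PySem.Str.strip, PySem.Str.lstrip, PySem.Str.rstrip, String.toList_ofList]
  exact congrArg String.ofList
    (by simp [PySem.Chars.strip, PySem.Chars.rstrip, PySem.Chars.lstrip])

lemma foldlA_eq (ps : List String) : ∀ (s : Int) (acc : List (Int × Int)),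
    (ps.foldl (fun (st : Int × List (Int × Int)) tseg =>
      let tseg_l := PySem.Str.lstrip tseg
      let tseg_lr := PySem.Str.rstrip tseg_l
      let padding_left : Int := (PySem.Str.len tseg : Int) - (PySem.Str.len tseg_l : Int)
      let padding_right : Int := (PySem.Str.len tseg_l : Int) - (PySem.Str.len tseg_lr : Int)
      let tmp_seg_left : Int := st.1 + padding_left
      let tmp_seg_right : Int := tmp_seg_left + (PySem.Str.len tseg_lr : Int)
      (tmp_seg_right + padding_right, st.2 ++ [(tmp_seg_left, tmp_seg_right)])) (s, acc)).2
    = acc ++ pvGo s ps := by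
  induction ps with
  | nil => intro s acc; simp [pvGo]
  | cons p ps ih =>
      intro s acc
      rw [List.foldl_cons]
      have hstep : (fun (st : Int × List (Int × Int)) tseg =>
          let tseg_l := PySem.Str.lstrip tseg
          let tseg_lr := PySem.Str.rstrip tseg_l
          let padding_left : Int := (PySem.Str.len tseg : Int) - (PySem.Str.len tseg_l : Int)
          let padding_right : Int := (PySem.Str.len tseg_l : Int) - (PySem.Str.len tseg_lr : Int)
          let tmp_seg_left : Int := st.1 + padding_left
          let tmp_seg_right : Int := tmp_seg_left + (PySem.Str.len tseg_lr : Int)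
          (tmp_seg_right + padding_right, st.2 ++ [(tmp_seg_left, tmp_seg_right)])) (s, acc) p
          = (s + (PySem.Str.len p : Int),
             acc ++ [(s + ((PySem.Str.len p : Int) - (PySem.Str.len (PySem.Str.lstrip p) : Int)),
                      s + ((PySem.Str.len p : Int) - (PySem.Str.len (PySem.Str.lstrip p) : Int))
                        + (PySem.Str.len (PySem.Str.strip p) : Int))]) := by
        rw [strip_eq_rstrip_lstrip]
        show (_ , _) = (_ , _)
        rw [Prod.mk.injEq]
        exact ⟨by ring, rfl⟩
      have h2 := congrArg (fun st => (ps.foldl (fun (st : Int × List (Int × Int)) tseg =>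
          let tseg_l := PySem.Str.lstrip tseg
          let tseg_lr := PySem.Str.rstrip tseg_l
          let padding_left : Int := (PySem.Str.len tseg : Int) - (PySem.Str.len tseg_l : Int)
          let padding_right : Int := (PySem.Str.len tseg_l : Int) - (PySem.Str.len tseg_lr : Int)
          let tmp_seg_left : Int := st.1 + padding_left
          let tmp_seg_right : Int := tmp_seg_left + (PySem.Str.len tseg_lr : Int)
          (tmp_seg_right + padding_right, st.2 ++ [(tmp_seg_left, tmp_seg_right)])) st).2) hstep
      refine h2.trans ?_
      refine (ih (s + (PySem.Str.len p : Int))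
            (acc ++ [(s + ((PySem.Str.len p : Int) - (PySem.Str.len (PySem.Str.lstrip p) : Int)),
                      s + ((PySem.Str.len p : Int) - (PySem.Str.len (PySem.Str.lstrip p) : Int))
                        + (PySem.Str.len (PySem.Str.strip p) : Int))])).trans ?_
      rw [show pvGo s (p :: ps)
             = (s + ((PySem.Str.len p : Int) - (PySem.Str.len (PySem.Str.lstrip p) : Int)),
                s + ((PySem.Str.len p : Int) - (PySem.Str.len (PySem.Str.lstrip p) : Int))
                  + (PySem.Str.len (PySem.Str.strip p) : Int))
                 :: pvGo (s + (PySem.Str.len p : Int)) ps from rfl,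
          List.append_assoc, List.singleton_append]

lemma foldlB_eq (ps : List String) : ∀ (pre : List Int) (s : Int),
    (ps.foldl (fun (acc : List Int) p => acc ++ [acc.getLast! + (PySem.Str.len p : Int)])
      (pre ++ [s]))
    = pre ++ pvOffs s ps := by
  induction ps with
  | nil => intro pre s; simp [pvOffs]
  | cons p ps ih =>
      intro pre s
      rw [List.foldl_cons]
      have hl : (pre ++ [s]).getLast! = s := by simp
      rw [hl, ih (pre ++ [s]) (s + (PySem.Str.len p : Int)),
          show pvOffs s (p :: ps) = s :: pvOffs (s + (PySem.Str.len p : Int)) ps from rfl,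
          List.append_assoc, List.singleton_append]

lemma zip_map_eq (ps : List String) : ∀ (s : Int),
    ((pvOffs s ps).zip ps).map (fun op =>
      let lead : Int := (PySem.Str.len op.2 : Int) - (PySem.Str.len (PySem.Str.lstrip op.2) : Int)
      (op.1 + lead, op.1 + lead + (PySem.Str.len (PySem.Str.strip op.2) : Int)))
    = pvGo s ps := by
  induction ps with
  | nil => intro s; rfl
  | cons p ps ih =>
      intro s
      rw [show pvOffs s (p :: ps) = s :: pvOffs (s + (PySem.Str.len p : Int)) ps from rfl,
          List.zip_cons_cons, List.map_cons, ih (s + (PySem.Str.len p : Int))]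
      rfl

-- ===== VERDICT (by name: the statement is the Claim_ definition above) =====
theorem edu_spans_spec : Claim_equal_edu_spans := by
  intro text pieces _
  unfold Spec_edu_spans
  have hoff := foldlB_eq pieces [] ((PySem.Str.len text : Int))
  rw [List.nil_append, List.nil_append] at hoff
  have hA : edu_spans text pieces = pvGo ((PySem.Str.len text : Int)) pieces := by
    have h := foldlA_eq pieces ((PySem.Str.len text : Int)) []
    rw [List.nil_append] at h
    exact h
  have hB : edu_spans_alt text pieces = pvGo ((PySem.Str.len text : Int)) pieces := by
    show ((pieces.foldl (fun (acc : List Int) p => acc ++ [acc.getLast! + (PySem.Str.len p : Int)])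
        [(PySem.Str.len text : Int)]).zip pieces).map (fun op =>
        let lead : Int := (PySem.Str.len op.2 : Int) - (PySem.Str.len (PySem.Str.lstrip op.2) : Int)
        (op.1 + lead, op.1 + lead + (PySem.Str.len (PySem.Str.strip op.2) : Int)))
      = pvGo ((PySem.Str.len text : Int)) pieces
    rw [hoff]
    exact zip_map_eq pieces ((PySem.Str.len text : Int))
  rw [hA, hB]
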